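-- pv_equiv track=rewrite | github.com/holohup/div_bot_2.0 | RedisAccessor/main.py | _organize_futures
-- ===== SOURCE A (Python) =====
-- def _organize_futures(instruments):
--     result = {}
--     for instrument in instruments:
--         ticker = instrument['basic_asset']
--         if ticker not in result.keys():
--             result[ticker] = []
--         result[ticker].append(instrument)
--     return result
-- ===== SOURCE B (Python) =====
-- def _organize_futures(instruments):
--     # Two-pass alternative: collect the distinct tickers in first-occurrence
--     # order, then build each group with one filtering comprehension.
--     tickers = dict.fromkeys(i['basic_asset'] for i in instruments)
--     return {t: [i for i in instruments if i['basic_asset'] == t] for t in tickers}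
-- ===== Notes on version B (the rewrite author's own statement) =====
-- stated objective: alternative
-- what changed: Replaces the streaming dict-insert-and-append loop by a two-pass scheme: dict.fromkeys collects the distinct tickers in first-occurrence order, then a dict comprehension builds each group by filtering the input once per ticker.
import Mathlib
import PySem

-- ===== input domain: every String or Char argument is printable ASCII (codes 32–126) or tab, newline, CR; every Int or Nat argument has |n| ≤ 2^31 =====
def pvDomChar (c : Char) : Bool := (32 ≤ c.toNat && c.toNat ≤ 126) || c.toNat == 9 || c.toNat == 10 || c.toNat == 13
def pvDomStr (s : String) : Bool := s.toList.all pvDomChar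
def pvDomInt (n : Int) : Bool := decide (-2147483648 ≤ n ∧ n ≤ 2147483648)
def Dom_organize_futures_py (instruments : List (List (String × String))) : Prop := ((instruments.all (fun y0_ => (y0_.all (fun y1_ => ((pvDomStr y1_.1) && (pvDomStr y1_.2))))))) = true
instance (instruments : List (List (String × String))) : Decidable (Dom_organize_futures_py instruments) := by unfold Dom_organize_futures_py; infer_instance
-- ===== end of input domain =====

-- B differs from A only in strategy (two passes instead of one streaming dict);
-- the return value is identical on every input where A returns.

-- instrument['basic_asset'] with a default (Pre_ guarantees the key is present)
def pvTicker (instrument : List (String × String)) : String :=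
  (PySem.Dict.mk instrument).getD "basic_asset" ""

-- ===== PORT A =====
def organize_futures_py (instruments : List (List (String × String))) : List (String × List (List (String × String))) :=
  (instruments.foldl
    (fun result instrument =>
      let ticker := pvTicker instrument
      let result := if result.keys.contains ticker then result else result.insert ticker []
      result.modify ticker [] (fun l => l ++ [instrument]))
    PySem.Dict.empty).items

-- ===== PORT B =====
def organize_futures_py_alt (instruments : List (List (String × String))) : List (String × List (List (String × String))) :=
  let tickers := PySem.Set.ofList (instruments.map pvTicker)
  tickers.map (fun t => (t, instruments.filter (fun i => pvTicker i == t)))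

-- ===== PRECONDITION & SPEC =====
-- Pre_ excludes exactly the inputs where some instrument lacks the 'basic_asset'
-- key, on which Python A raises KeyError (B raises there too).
def Pre_organize_futures_py (instruments : List (List (String × String))) : Prop :=
  ∀ i ∈ instruments, (PySem.Dict.mk i).contains "basic_asset" = true
instance (instruments : List (List (String × String))) : Decidable (Pre_organize_futures_py instruments) := by unfold Pre_organize_futures_py; infer_instance

def pvWitness_organize_futures_py : (List (List (String × String))) :=
  [[("basic_asset", "SBER"), ("figi", "F1")], [("basic_asset", "GAZP")], [("basic_asset", "SBER")]]

def Spec_organize_futures_py (instruments : List (List (String × String))) (out : List (String × List (List (String × String)))) : Prop := out = organize_futures_py_alt instruments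
instance (instruments : List (List (String × String))) (out : List (String × List (List (String × String)))) : Decidable (Spec_organize_futures_py instruments out) := by unfold Spec_organize_futures_py; infer_instance

-- ===== CLAIM (what is proved, stated in full; the proofs are below) =====
def Claim_equal_organize_futures_py : Prop := ∀ (instruments : List (List (String × String))), Dom_organize_futures_py instruments → Pre_organize_futures_py instruments → Spec_organize_futures_py instruments (organize_futures_py instruments)

-- ===== LEMMAS AND PROOFS =====

-- A's loop body equals a single dict 'modify' (insert-empty-then-append = modify with default []).
lemma pv_step_eq (d : PySem.Dict String (List (List (String × String)))) (x : List (String × String)) :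
    (if d.keys.contains (pvTicker x) then d else d.insert (pvTicker x) []).modify (pvTicker x) []
        (fun l => l ++ [x])
      = d.modify (pvTicker x) [] (fun l => l ++ [x]) := by
  by_cases h : d.keys.contains (pvTicker x) = true
  · rw [if_pos h]
  · rw [if_neg h]
    have hc : d.contains (pvTicker x) = false := by
      rw [Bool.eq_false_iff]
      intro hcon
      exact h (by simpa using (PySem.Dict.contains_iff_mem_keys d (pvTicker x)).mp hcon)
    unfold PySem.Dict.modify
    rw [PySem.Dict.getD_insert_self, PySem.Dict.insert_insert_self,
        PySem.Dict.getD_of_not_contains d [] hc]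

lemma pv_foldl_modify (instruments : List (List (String × String))) :
    instruments.foldl
      (fun result instrument =>
        let ticker := pvTicker instrument
        let result := if result.keys.contains ticker then result else result.insert ticker []
        result.modify ticker [] (fun l => l ++ [instrument]))
      PySem.Dict.empty
    = instruments.foldl (fun d x => d.modify (pvTicker x) [] (fun l => l ++ [x])) PySem.Dict.empty := by
  exact PySem.List.foldl_congr_mem _ _ _ _ (fun acc x _ => pv_step_eq acc x)

-- ===== VERDICT (by name: the statement is the Claim_ definition above) =====
theorem organize_futures_py_spec : Claim_equal_organize_futures_py := by
  intro instruments _ _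
  show organize_futures_py instruments = organize_futures_py_alt instruments
  unfold organize_futures_py organize_futures_py_alt
  rw [pv_foldl_modify]
  have hnd : (instruments.foldl (fun d x => d.modify (pvTicker x) [] (fun l => l ++ [x]))
      (PySem.Dict.empty : PySem.Dict String (List (List (String × String))))).keys.Nodup :=
    PySem.Dict.nodup_keys_foldl_modify_key instruments pvTicker [] _ _ (by simp [PySem.Dict.keys_empty])
  rw [PySem.Dict.items_eq_map_keys _ hnd []]
  rw [PySem.Dict.keys_foldl_modify_key]
  rw [PySem.Dict.keys_empty, PySem.Set.update_nil_left]
  apply List.map_congr_left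
  intro t _
  have hfold :
      instruments.foldl (fun d x => d.modify (pvTicker x) [] (fun l => l ++ [x]))
        (PySem.Dict.empty : PySem.Dict String (List (List (String × String))))
      = (instruments.map (fun x => (pvTicker x, x))).foldl
          (fun d p => d.modify p.1 [] (fun l => l ++ [p.2])) PySem.Dict.empty := by
    rw [List.foldl_map]
  rw [hfold, PySem.Dict.getD_foldl_modify_append]
  simp [List.filter_map, List.map_map, Function.comp_def]
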